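-- pv_equiv track=rewrite | github.com/skyrim4ev3r/leetcode_solutions | algorithms/1_easy/T/03637_trionic_array_i/solution.py | isTrionic
-- ===== SOURCE A (Python) =====
-- from typing import List
--
-- def isTrionic(nums: List[int]) -> bool:
--     nums_len = len(nums)
--
--     if nums_len <= 3 or nums[0] >= nums[1] or nums[-2] >= nums[-1]:
--         return False
--
--     change_count = 0
--     is_increasing = True
--
--     for i in range(1, nums_len):
--         if change_count > 2 or nums[i] == nums[i - 1]:
--             return False
--
--         if (nums[i] > nums[i - 1]) != is_increasing:
--             is_increasing = not is_increasing
--             change_count += 1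
--
--     return change_count == 2
-- ===== SOURCE B (Python) =====
-- from typing import List
--
-- def isTrionic(nums: List[int]) -> bool:
--     n = len(nums)
--
--     def run(i: int, up: bool) -> int:
--         while i + 1 < n and (nums[i] < nums[i + 1] if up else nums[i] > nums[i + 1]):
--             i += 1
--         return i
--
--     p = run(0, True)
--     q = run(p, False)
--     r = run(q, True)
--     return 0 < p < q < r == n - 1
-- ===== Notes on version B (the rewrite author's own statement) =====
-- stated objective: alternative
-- what changed: B peels three monotonic runs with a moving pointer (up, down, up) and checks each run is nonempty and the pointer ends at the last index, instead of A's direction-flip state machine counting changes.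
import Mathlib
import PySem

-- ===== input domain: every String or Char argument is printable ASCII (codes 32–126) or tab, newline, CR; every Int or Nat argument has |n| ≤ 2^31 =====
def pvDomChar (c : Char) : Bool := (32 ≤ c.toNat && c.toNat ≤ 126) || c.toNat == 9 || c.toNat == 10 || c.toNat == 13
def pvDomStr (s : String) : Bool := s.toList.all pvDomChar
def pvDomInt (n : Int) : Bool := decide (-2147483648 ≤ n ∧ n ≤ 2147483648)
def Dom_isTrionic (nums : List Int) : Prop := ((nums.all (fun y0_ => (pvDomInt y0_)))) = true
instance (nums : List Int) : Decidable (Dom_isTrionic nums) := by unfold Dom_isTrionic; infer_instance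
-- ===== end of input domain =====

-- B checks the up-down-up structure by peeling three monotonic runs with a pointer
-- instead of A's flip-counting state machine; same O(n) cost, different decomposition.

-- ===== PORT A =====
-- in-range indexing nums[i] (both programs only index with 0 ≤ i < n, so this is exact)
def pvAt (nums : List Int) (i : Nat) : Int := nums.getD i 0

-- the for-loop 'for i in range(1, n)' as structural recursion on the index
def loopA (nums : List Int) (n i : Nat) (cc : Int) (inc : Bool) : Bool :=
  if i < n then
    if cc > 2 ∨ pvAt nums i = pvAt nums (i-1) then false
    else if (decide (pvAt nums i > pvAt nums (i-1))) ≠ inc then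
      loopA nums n (i+1) (cc+1) (!inc)
    else loopA nums n (i+1) cc inc
  else decide (cc = 2)
termination_by n - i

def isTrionic (nums : List Int) : Bool :=
  let n := nums.length
  -- the guard n ≤ 3 short-circuits, so below it n ≥ 4 and 0, 1, n-2, n-1 are in range
  if n ≤ 3 then false
  else if pvAt nums 0 ≥ pvAt nums 1 then false
  else if pvAt nums (n-2) ≥ pvAt nums (n-1) then false
  else loopA nums n 1 0 true

-- ===== PORT B =====
def cmpB (lt : Bool) (a b : Int) : Bool := if lt then decide (a < b) else decide (a > b)

-- Source B's 'run': advance the pointer while the run continues; indices are in range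
def advance (lt : Bool) (nums : List Int) (i : Nat) : Nat :=
  if i + 1 < nums.length then
    if cmpB lt (pvAt nums i) (pvAt nums (i+1)) then advance lt nums (i+1) else i
  else i
termination_by nums.length - i

def isTrionic_alt (nums : List Int) : Bool :=
  let n := nums.length
  let p := advance true nums 0
  let q := advance false nums p
  let r := advance true nums q
  decide (0 < p ∧ p < q ∧ q < r ∧ r = n - 1)

-- ===== PRECONDITION & SPEC =====
def Spec_isTrionic (nums : List Int) (out : Bool) : Prop := out = isTrionic_alt nums
instance (nums : List Int) (out : Bool) : Decidable (Spec_isTrionic nums out) := by unfold Spec_isTrionic; infer_instance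

-- ===== CLAIM (what is proved, stated in full; the proofs are below) =====
def Claim_equal_isTrionic : Prop := ∀ (nums : List Int), Dom_isTrionic nums → Spec_isTrionic nums (isTrionic nums)

-- ===== LEMMAS AND PROOFS =====

lemma advance_ge (lt : Bool) (nums : List Int) (i : Nat) : i ≤ advance lt nums i := by
  fun_induction advance with
  | case1 i h hc ih => omega
  | case2 => omega
  | case3 => omega

lemma advance_lt (lt : Bool) (nums : List Int) (i : Nat) (h : i < nums.length) :
    advance lt nums i < nums.length := by
  fun_induction advance with
  | case1 i h0 hc ih => exact ih (by omega)
  | case2 => omega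
  | case3 => omega

lemma advance_stop (lt : Bool) (nums : List Int) (i : Nat)
    (h : advance lt nums i + 1 < nums.length) :
    cmpB lt (pvAt nums (advance lt nums i)) (pvAt nums (advance lt nums i + 1)) = false := by
  fun_induction advance with
  | case1 i h0 hc ih => exact ih h
  | case2 i h0 hc => simpa using hc
  | case3 i h0 => omega

lemma advance_succ (lt : Bool) (nums : List Int) (i : Nat) (h : i + 1 < nums.length)
    (hc : cmpB lt (pvAt nums i) (pvAt nums (i+1)) = true) :
    advance lt nums i = advance lt nums (i+1) := by
  rw [advance, if_pos h, if_pos hc]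

lemma advance_stay (lt : Bool) (nums : List Int) (i : Nat)
    (hc : ¬ (i + 1 < nums.length) ∨ cmpB lt (pvAt nums i) (pvAt nums (i+1)) = false) :
    advance lt nums i = i := by
  rcases hc with hc | hc
  · rw [advance, if_neg hc]
  · by_cases h : i + 1 < nums.length
    · rw [advance, if_pos h, if_neg (by simpa using hc)]
    · rw [advance, if_neg h]

lemma advance_last (lt : Bool) (nums : List Int) (i : Nat) (h : i < advance lt nums i) :
    cmpB lt (pvAt nums (advance lt nums i - 1)) (pvAt nums (advance lt nums i)) = true := by
  fun_induction advance with
  | case1 i h0 hc ih =>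
    by_cases h1 : i + 1 < advance lt nums (i+1)
    · exact ih h1
    · have h2 : advance lt nums (i+1) = i + 1 := le_antisymm (by omega) (advance_ge lt nums (i+1))
      rw [h2]; simpa using hc
  | case2 => omega
  | case3 => omega

lemma loopA_gt2 (nums : List Int) (n i : Nat) (cc : Int) (inc : Bool) (h : 2 < cc) :
    loopA nums n i cc inc = false := by
  rw [loopA]
  by_cases hi : i < n
  · simp [hi, h]
  · simp [hi]; omega

lemma loopA_step (nums : List Int) (m : Nat) (_hm : m < nums.length) (cc : Int) (inc : Bool)
    (hcc : cc ≤ 2) :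
    loopA nums nums.length (m+1) cc inc =
      (if advance inc nums m + 1 < nums.length then
         (if pvAt nums (advance inc nums m) = pvAt nums (advance inc nums m + 1) then false
          else loopA nums nums.length (advance inc nums m + 2) (cc+1) (!inc))
       else decide (cc = 2)) := by
  rw [loopA]
  by_cases h1 : m + 1 < nums.length
  · rw [if_pos h1]
    simp only [Nat.add_sub_cancel]
    by_cases heq : pvAt nums (m+1) = pvAt nums m
    · rw [if_pos (Or.inr heq)]
      have hstay : advance inc nums m = m := by
        apply advance_stay
        right
        cases inc <;> simp [cmpB] <;> omega
      rw [hstay, if_pos h1, if_pos heq.symm]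
    · rw [if_neg (not_or.mpr ⟨by omega, heq⟩)]
      by_cases hd : pvAt nums m < pvAt nums (m+1)
      · cases inc with
        | true =>
          -- increasing step in increasing mode: no flip, run continues
          rw [if_neg (by simp; omega)]
          have hsucc : advance true nums m = advance true nums (m+1) := by
            apply advance_succ _ _ _ h1
            simp [cmpB]; omega
          rw [hsucc]
          exact loopA_step nums (m+1) h1 cc true hcc
        | false =>
          -- increasing step in decreasing mode: flip, advance stops at m
          rw [if_pos (by simp; omega)]
          have hstay : advance false nums m = m := by
            apply advance_stay; right
            simp [cmpB]; omega
          rw [hstay, if_pos h1, if_neg (fun h => heq h.symm)]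
      · have hd' : pvAt nums (m+1) < pvAt nums m := by
          rcases lt_trichotomy (nums.getD (m+1) 0) (nums.getD m 0) with h | h | h
          · exact h
          · exact absurd h heq
          · exact absurd h hd
        cases inc with
        | true =>
          -- decreasing step in increasing mode: flip, advance stops at m
          rw [if_pos (by simp; omega)]
          have hstay : advance true nums m = m := by
            apply advance_stay; right
            simp [cmpB]; omega
          rw [hstay, if_pos h1, if_neg (fun h => heq h.symm)]
        | false =>
          -- decreasing step in decreasing mode: no flip, run continues
          rw [if_neg (by simp; omega)]
          have hsucc : advance false nums m = advance false nums (m+1) := by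
            apply advance_succ _ _ _ h1
            simp [cmpB]; omega
          rw [hsucc]
          exact loopA_step nums (m+1) h1 cc false hcc
  · rw [if_neg h1]
    have hstay : advance inc nums m = m := advance_stay _ _ _ (Or.inl (by omega))
    rw [hstay, if_neg (by omega)]
termination_by nums.length - m

-- ===== VERDICT (by name: the statement is the Claim_ definition above) =====
theorem isTrionic_spec : Claim_equal_isTrionic := by
  intro nums _
  unfold Spec_isTrionic
  simp only [isTrionic, isTrionic_alt]
  by_cases h3 : nums.length ≤ 3
  · rw [if_pos h3]
    symm
    simp only [decide_eq_false_iff_not]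
    rintro ⟨hp, hpq, hqr, hr⟩
    omega
  · rw [if_neg h3]
    by_cases h01 : pvAt nums 0 ≥ pvAt nums 1
    · rw [if_pos h01]
      have hp0 : advance true nums 0 = 0 :=
        advance_stay true nums 0 (Or.inr (by simp [cmpB]; omega))
      symm
      simp only [decide_eq_false_iff_not]
      rintro ⟨hp, _, _, _⟩
      omega
    · rw [if_neg h01]
      by_cases hlast : pvAt nums (nums.length - 2) ≥ pvAt nums (nums.length - 1)
      · rw [if_pos hlast]
        symm
        simp only [decide_eq_false_iff_not]
        rintro ⟨hp, hpq, hqr, hr⟩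
        have hlt := advance_last true nums (advance false nums (advance true nums 0)) hqr
        simp only [cmpB, if_true, decide_eq_true_eq] at hlt
        have e1 : advance true nums (advance false nums (advance true nums 0)) - 1
            = nums.length - 2 := by omega
        rw [e1, hr] at hlt
        omega
      · rw [if_neg hlast]
        -- main case: n ≥ 4, nums[0] < nums[1], nums[n-2] < nums[n-1]
        have h01' : pvAt nums 0 < pvAt nums 1 := by omega
        have hpeq : advance true nums 0 = advance true nums 1 :=
          advance_succ true nums 0 (by omega) (by simp [cmpB]; omega)
        have hp1 : 1 ≤ advance true nums 0 := hpeq ▸ advance_ge true nums 1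
        have hpn : advance true nums 0 < nums.length := advance_lt true nums 0 (by omega)
        rw [loopA_step nums 0 (by omega) 0 true (by omega)]
        set p := advance true nums 0 with hpdef
        by_cases hpi : p + 1 < nums.length
        · rw [if_pos hpi]
          have hstopP := advance_stop true nums 0 hpi
          rw [← hpdef] at hstopP
          simp only [cmpB, if_true, decide_eq_false_iff_not, not_lt] at hstopP
          by_cases heqP : pvAt nums p = pvAt nums (p+1)
          · rw [if_pos heqP]
            have hq : advance false nums p = p :=
              advance_stay false nums p (Or.inr (by simp [cmpB]; omega))
            symm
            simp only [decide_eq_false_iff_not]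
            rintro ⟨_, hpq, _, _⟩
            omega
          · rw [if_neg heqP]
            have hqeq : advance false nums p = advance false nums (p+1) :=
              advance_succ false nums p hpi (by simp [cmpB]; omega)
            have hq1 : p + 1 ≤ advance false nums p := hqeq ▸ advance_ge false nums (p+1)
            have hqn : advance false nums p < nums.length := advance_lt false nums p (by omega)
            simp only [Bool.not_true]
            rw [show (0:Int) + 1 = 1 by ring]
            rw [show p + 2 = (p+1) + 1 by ring]
            rw [loopA_step nums (p+1) hpi 1 false (by omega)]
            rw [← hqeq]
            set q := advance false nums p with hqdef
            by_cases hqi : q + 1 < nums.length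
            · rw [if_pos hqi]
              have hstopQ := advance_stop false nums p hqi
              rw [← hqdef] at hstopQ
              simp [cmpB] at hstopQ
              by_cases heqQ : pvAt nums q = pvAt nums (q+1)
              · rw [if_pos heqQ]
                have hr : advance true nums q = q :=
                  advance_stay true nums q (Or.inr (by simp [cmpB]; omega))
                symm
                simp only [decide_eq_false_iff_not]
                rintro ⟨_, _, hqr, _⟩
                omega
              · rw [if_neg heqQ]
                have hreq : advance true nums q = advance true nums (q+1) :=
                  advance_succ true nums q hqi (by simp [cmpB]; omega)
                have hr1 : q + 1 ≤ advance true nums q := hreq ▸ advance_ge true nums (q+1)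
                have hrn : advance true nums q < nums.length := advance_lt true nums q (by omega)
                simp only [Bool.not_false]
                rw [show (1:Int) + 1 = 2 by ring]
                rw [show q + 2 = (q+1) + 1 by ring]
                rw [loopA_step nums (q+1) hqi 2 true (by omega)]
                rw [← hreq]
                set r := advance true nums q with hrdef
                by_cases hri : r + 1 < nums.length
                · rw [if_pos hri]
                  by_cases heqR : pvAt nums r = pvAt nums (r+1)
                  · rw [if_pos heqR]
                    symm
                    simp only [decide_eq_false_iff_not]
                    rintro ⟨_, _, _, hr⟩
                    omega
                  · rw [if_neg heqR]
                    rw [loopA_gt2 nums nums.length (r+2) (2+1) (!true) (by omega)]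
                    symm
                    simp only [decide_eq_false_iff_not]
                    rintro ⟨_, _, _, hr⟩
                    omega
                · rw [if_neg hri]
                  symm
                  simp only [decide_eq_decide]
                  constructor
                  · intro _; trivial
                  · intro _
                    refine ⟨by omega, by omega, by omega, by omega⟩
            · rw [if_neg hqi]
              rw [show (decide ((1:Int) = 2)) = false from by decide]
              symm
              simp only [decide_eq_false_iff_not]
              rintro ⟨_, _, hqr, hrr⟩
              have hrq : advance true nums q = q :=
                advance_stay true nums q (Or.inl (by omega))
              omega
        · rw [if_neg hpi]
          rw [show (decide ((0:Int) = 2)) = false from by decide]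
          symm
          simp only [decide_eq_false_iff_not]
          rintro ⟨_, hpq, _, _⟩
          have hqp : advance false nums p = p :=
            advance_stay false nums p (Or.inl (by omega))
          omega
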